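-- pv_equiv track=rewrite | github.com/BlueFlakes/RogGame | game_core.py | create_inventory_board
-- ===== SOURCE A (Python) =====
-- def create_inventory_board(width, height):
--     inventory_board = []
--
--     for row in range(height):
--         temporary_storage = []
--
--         for column in range(width):
--             if row == 0 or row == (height - 1) or row == 6:
--                 temporary_storage.append("_")
--             else:
--                 if column == 0 or column == (width - 1) or column == int(width/2):
--                     temporary_storage.append("|")
--                 else:
--                     temporary_storage.append(" ")
--
--         inventory_board.append(temporary_storage)
--
--     return inventory_board
-- ===== SOURCE B (Python) =====
-- def create_inventory_board(width, height):
--     if height <= 0: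
--         return []
--     border = ["_"] * width
--     mid = int(width / 2)
--     interior = ["|" if c == 0 or c == width - 1 or c == mid else " "
--                 for c in range(width)]
--     return [border[:] if r == 0 or r == height - 1 or r == 6 else interior[:]
--             for r in range(height)]
-- ===== Notes on version B (the rewrite author's own statement) =====
-- stated objective: faster
-- what changed: B precomputes the border and interior row templates once and then selects a fresh copy per row, instead of re-running the per-column conditional scan for every row.
import Mathlib
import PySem

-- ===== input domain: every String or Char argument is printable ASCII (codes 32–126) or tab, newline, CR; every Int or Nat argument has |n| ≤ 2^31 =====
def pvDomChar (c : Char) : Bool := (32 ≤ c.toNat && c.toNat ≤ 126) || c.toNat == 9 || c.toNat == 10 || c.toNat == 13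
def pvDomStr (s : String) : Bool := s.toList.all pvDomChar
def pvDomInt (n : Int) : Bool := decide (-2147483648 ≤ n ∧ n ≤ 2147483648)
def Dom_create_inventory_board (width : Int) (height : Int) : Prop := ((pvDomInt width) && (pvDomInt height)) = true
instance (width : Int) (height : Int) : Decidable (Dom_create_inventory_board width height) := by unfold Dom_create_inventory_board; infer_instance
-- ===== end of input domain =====

-- B precomputes the two row templates once and selects per row; A recomputes each cell. Same return value.
-- ===== PORT A =====
def create_inventory_board (width : Int) (height : Int) : List (List String) :=
  (PySem.List.pyRange 0 height 1).foldl (fun inventory_board row =>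
    inventory_board ++
      [(PySem.List.pyRange 0 width 1).foldl (fun temporary_storage column =>
          if row == 0 || row == height - 1 || row == 6 then
            temporary_storage ++ ["_"]
          else if column == 0 || column == width - 1 || column == Int.tdiv width 2 then
            temporary_storage ++ ["|"]
          else
            temporary_storage ++ [" "]) []]) []

-- ===== PORT B =====
def create_inventory_board_alt (width : Int) (height : Int) : List (List String) :=
  if height ≤ 0 then [] else
  let border := List.replicate width.toNat "_"
  let mid := Int.tdiv width 2
  let interior := (PySem.List.pyRange 0 width 1).map (fun c =>
    if c == 0 || c == width - 1 || c == mid then "|" else " ")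
  (PySem.List.pyRange 0 height 1).map (fun r =>
    if r == 0 || r == height - 1 || r == 6 then border else interior)

-- ===== PRECONDITION & SPEC =====
def Spec_create_inventory_board (width : Int) (height : Int) (out : List (List String)) : Prop := out = create_inventory_board_alt width height
instance (width : Int) (height : Int) (out : List (List String)) : Decidable (Spec_create_inventory_board width height out) := by unfold Spec_create_inventory_board; infer_instance

-- ===== CLAIM (what is proved, stated in full; the proofs are below) =====
def Claim_equal_create_inventory_board : Prop := ∀ (width : Int) (height : Int), Dom_create_inventory_board width height → Spec_create_inventory_board width height (create_inventory_board width height)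

-- ===== LEMMAS AND PROOFS =====

theorem pv_inner_if (width height row : Int)
    (temporary_storage : List String) :
    (PySem.List.pyRange 0 width 1).foldl (fun temporary_storage column =>
        if row == 0 || row == height - 1 || row == 6 then
          temporary_storage ++ ["_"]
        else if column == 0 || column == width - 1 || column == Int.tdiv width 2 then
          temporary_storage ++ ["|"]
        else
          temporary_storage ++ [" "]) temporary_storage =
      temporary_storage ++ (PySem.List.pyRange 0 width 1).map (fun column =>
        if row == 0 || row == height - 1 || row == 6 then "_"
        else if column == 0 || column == width - 1 || column == Int.tdiv width 2 then "|"
        else " ") := by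
  rw [show (fun (temporary_storage : List String) (column : Int) =>
        if row == 0 || row == height - 1 || row == 6 then
          temporary_storage ++ ["_"]
        else if column == 0 || column == width - 1 || column == Int.tdiv width 2 then
          temporary_storage ++ ["|"]
        else
          temporary_storage ++ [" "]) =
      (fun (acc : List String) (column : Int) =>
        acc ++ [if row == 0 || row == height - 1 || row == 6 then "_"
          else if column == 0 || column == width - 1 || column == Int.tdiv width 2 then "|"
          else " "]) from by
    funext acc c; split_ifs <;> rfl]
  exact PySem.List.foldl_append_singleton_eq_map _ _ _

theorem pv_border_row (width : Int) :
    (PySem.List.pyRange 0 width 1).map (fun _ => ("_" : String)) =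
      List.replicate width.toNat "_" := by
  rw [show (fun (_ : Int) => ("_" : String)) = Function.const Int ("_" : String) from rfl,
    List.map_const, PySem.List.length_pyRange_one]
  simp

theorem create_inventory_board_eq (width height : Int) :
    create_inventory_board width height = create_inventory_board_alt width height := by
  unfold create_inventory_board create_inventory_board_alt
  by_cases hle : height ≤ 0
  case pos =>
    rw [if_pos hle, PySem.List.pyRange_one_eq_nil hle]
    rfl
  case neg =>
    rw [if_neg hle]
    rw [show (fun (inventory_board : List (List String)) (row : Int) =>
        inventory_board ++
          [(PySem.List.pyRange 0 width 1).foldl (fun temporary_storage column =>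
              if row == 0 || row == height - 1 || row == 6 then
                temporary_storage ++ ["_"]
              else if column == 0 || column == width - 1 || column == Int.tdiv width 2 then
                temporary_storage ++ ["|"]
              else
                temporary_storage ++ [" "]) []]) =
      (fun (acc : List (List String)) (row : Int) =>
        acc ++ [if row == 0 || row == height - 1 || row == 6 then
            List.replicate width.toNat "_"
          else (PySem.List.pyRange 0 width 1).map (fun c =>
            if c == 0 || c == width - 1 || c == Int.tdiv width 2 then "|" else " ")]) from by
      funext acc row
      rw [pv_inner_if]
      by_cases h : (row == 0 || row == height - 1 || row == 6) = true
      · simp only [h, if_true, List.nil_append]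
        rw [pv_border_row]
      · simp [h]]
    exact PySem.List.foldl_append_singleton_eq_map _ _ _

-- ===== VERDICT (by name: the statement is the Claim_ definition above) =====
theorem create_inventory_board_spec : Claim_equal_create_inventory_board := by
  intro width height _
  unfold Spec_create_inventory_board
  exact create_inventory_board_eq width height
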